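-- pv_equiv track=rewrite | github.com/prongs1996/DNAStorageToolkit | 2-simulating_wetlab/nn/dnacodec/trace_reconstruction/dp_gen.py | free_recursive
-- ===== SOURCE A (Python) =====
-- def free_recursive(n, k):
--     code = ""
--     index = ""
--     for i in range(0, k):
--         index += "[i" + str(i + 1) + "]"
--     code += "for (int i" + str(k) + " = 0; i" + str(k) + " < l[" + str(k - 1) + "] + 1; ++i" + str(k) + ") {\n"
--     if k != (n - 1):
--         code += free_recursive(n, k + 1)
--     code += "delete [] score" + index + ";\n"
--     code += "delete [] track" + index + ";\n"
--     code += "}\n"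
--     return code
-- ===== SOURCE B (Python) =====
-- def free_recursive(n, k):
--     parts = []
--     for j in range(k, n):
--         parts.append("for (int i" + str(j) + " = 0; i" + str(j) + " < l[" + str(j - 1) + "] + 1; ++i" + str(j) + ") {\n")
--     for j in range(n - 1, k - 1, -1):
--         idx = "".join("[i" + str(t) + "]" for t in range(1, j + 1))
--         parts.append("delete [] score" + idx + ";\n")
--         parts.append("delete [] track" + idx + ";\n")
--         parts.append("}\n")
--     return "".join(parts)
-- ===== Notes on version B (the rewrite author's own statement) =====
-- stated objective: alternative
-- what changed: Replaces A's recursion over levels (which rebuilds the bracket index string from scratch at every level) with two sequential iterative loops: one emitting all for-headers from k to n-1, then one emitting the delete/close blocks in reverse level order, joining the parts once.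
import Mathlib
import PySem

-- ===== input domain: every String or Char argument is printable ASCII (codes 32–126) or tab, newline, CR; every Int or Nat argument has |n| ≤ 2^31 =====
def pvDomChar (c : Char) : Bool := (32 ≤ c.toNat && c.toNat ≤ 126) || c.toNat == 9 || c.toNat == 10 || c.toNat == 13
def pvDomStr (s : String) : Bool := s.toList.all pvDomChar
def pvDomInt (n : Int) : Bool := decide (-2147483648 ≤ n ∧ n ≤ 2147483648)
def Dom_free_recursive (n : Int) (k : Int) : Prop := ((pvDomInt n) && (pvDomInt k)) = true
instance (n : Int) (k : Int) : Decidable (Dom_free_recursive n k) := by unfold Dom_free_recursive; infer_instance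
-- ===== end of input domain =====

-- B replaces A's recursion by two sequential loops (all for-headers first, then all delete/close
-- blocks in reverse level order); equivalence of return values is proved on Pre_ (k ≤ n - 1,
-- exactly where A's recursion terminates). Objective: alternative decomposition.

-- ===== PORT A =====
-- A works on Python str; the port computes on List Char (exact for the ASCII text built here)
-- and wraps with String.ofList at the end.
def freeRecAuxA (n : Int) (k : Int) : List Char :=
  let index := (PySem.List.pyRange 0 k 1).foldl
    (fun acc i => acc ++ "[i".toList ++ PySem.Int.toChars (i + 1) ++ "]".toList) []
  let code := "for (int i".toList ++ PySem.Int.toChars k ++ " = 0; i".toList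
    ++ PySem.Int.toChars k ++ " < l[".toList ++ PySem.Int.toChars (k - 1)
    ++ "] + 1; ++i".toList ++ PySem.Int.toChars k ++ ") {\n".toList
  -- Python's branch condition is 'k ≠ n - 1'; the extra 'k < n - 1' is a totality guard only:
  -- when k > n - 1 Python recurses forever (RecursionError), excluded by Pre_ below.
  let code := if k ≠ n - 1 ∧ k < n - 1 then code ++ freeRecAuxA n (k + 1) else code
  code ++ "delete [] score".toList ++ index ++ ";\n".toList
       ++ "delete [] track".toList ++ index ++ ";\n".toList ++ "}\n".toList
termination_by (n - 1 - k).toNat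
decreasing_by omega

def free_recursive (n : Int) (k : Int) : String := String.ofList (freeRecAuxA n k)

-- ===== PORT B =====
def headerB (j : Int) : List Char :=
  "for (int i".toList ++ PySem.Int.toChars j ++ " = 0; i".toList
    ++ PySem.Int.toChars j ++ " < l[".toList ++ PySem.Int.toChars (j - 1)
    ++ "] + 1; ++i".toList ++ PySem.Int.toChars j ++ ") {\n".toList

def idxB (j : Int) : List Char :=
  PySem.Chars.join []
    ((PySem.List.pyRange 1 (j + 1) 1).map
      (fun t => "[i".toList ++ PySem.Int.toChars t ++ "]".toList))

def closerB (j : Int) : List Char :=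
  "delete [] score".toList ++ idxB j ++ ";\n".toList
    ++ "delete [] track".toList ++ idxB j ++ ";\n".toList ++ "}\n".toList

def free_recursive_alt (n : Int) (k : Int) : String :=
  let parts₁ := (PySem.List.pyRange k n 1).foldl (fun acc j => acc ++ headerB j) []
  let parts₂ := (PySem.List.pyRange (n - 1) (k - 1) (-1)).foldl (fun acc j => acc ++ closerB j) parts₁
  String.ofList parts₂

-- ===== PRECONDITION & SPEC =====
-- Pre_ excludes k > n - 1, where Python A recurses without reaching its base case and raises
-- RecursionError, and nesting depths n - k > 990, where A's one-frame-per-level recursion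
-- overruns CPython's default 1000-frame recursion limit and raises RecursionError as well.
def Pre_free_recursive (n : Int) (k : Int) : Prop := k ≤ n - 1 ∧ n - k ≤ 990
instance (n : Int) (k : Int) : Decidable (Pre_free_recursive n k) := by
  unfold Pre_free_recursive; infer_instance

def pvWitness_free_recursive : Int × Int := (3, 0)

def Spec_free_recursive (n : Int) (k : Int) (out : String) : Prop := out = free_recursive_alt n k
instance (n : Int) (k : Int) (out : String) : Decidable (Spec_free_recursive n k out) := by
  unfold Spec_free_recursive; infer_instance

-- ===== CLAIM (what is proved, stated in full; the proofs are below) =====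
def Claim_equal_free_recursive : Prop := ∀ (n : Int) (k : Int), Dom_free_recursive n k → Pre_free_recursive n k → Spec_free_recursive n k (free_recursive n k)
-- ===== LEMMAS AND PROOFS =====

-- A's index string at level k equals B's index string at level k.
lemma join_nil_eq_flatten (l : List (List Char)) : PySem.Chars.join [] l = l.flatten := by
  show List.intercalate [] l = l.flatten
  unfold List.intercalate
  induction l with
  | nil => simp
  | cons x xs ih => cases xs <;> simp_all [List.intersperse]

lemma idxA_eq_idxB (k : Int) :
    (PySem.List.pyRange 0 k 1).foldl
      (fun acc i => acc ++ "[i".toList ++ PySem.Int.toChars (i + 1) ++ "]".toList) []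
      = idxB k := by
  simp only [List.append_assoc]
  rw [PySem.List.foldl_append_eq_flatMap
      (fun i => "[i".toList ++ (PySem.Int.toChars (i + 1) ++ "]".toList))]
  unfold idxB
  rw [join_nil_eq_flatten, PySem.List.pyRange_one 0 k, PySem.List.pyRange_one 1 (k + 1)]
  have h1 : (k + 1 - 1).toNat = (k - 0).toNat := by omega
  rw [h1]
  simp only [List.map_map, List.flatMap, List.nil_append]
  congr 1
  apply List.map_congr_left
  intro a _
  simp only [Function.comp]
  have : (0 + (a : Int) + 1) = 1 + (a : Int) := by omega
  rw [this]
  simp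

-- Core: A's recursion equals B's two flatMaps, for every admissible k.
lemma pyRange_countdown_split (a b : Int) (h : b < a) :
    PySem.List.pyRange a (b - 1) (-1) = PySem.List.pyRange a b (-1) ++ [b] := by
  rw [PySem.List.pyRange_neg_one_eq_reverse a (b - 1),
      PySem.List.pyRange_neg_one_eq_reverse a b]
  have : (b - 1 + 1 : Int) = b := by omega
  rw [this, PySem.List.pyRange_one_cons (by omega : b < a + 1)]
  simp

lemma freeRecAuxA_eq_aux (m : Nat) : ∀ (n k : Int), k ≤ n - 1 → (n - 1 - k).toNat = m →
    freeRecAuxA n k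
      = (PySem.List.pyRange k n 1).flatMap headerB
        ++ (PySem.List.pyRange (n - 1) (k - 1) (-1)).flatMap closerB := by
  induction m with
  | zero =>
    intro n k h hm
    have hk : k = n - 1 := by omega
    subst hk
    rw [freeRecAuxA]
    have hcond : ¬ (n - 1 ≠ n - 1 ∧ n - 1 < n - 1) := by omega
    simp only [hcond, if_false]
    have h1 : PySem.List.pyRange (n - 1) n 1 = [n - 1] := by
      have h := PySem.List.pyRange_one_singleton (n - 1)
      rw [show (n - 1 + 1 : Int) = n from by omega] at h
      exact h
    have h2 : PySem.List.pyRange (n - 1) (n - 1 - 1) (-1) = [n - 1] := by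
      rw [PySem.List.pyRange_neg_one_cons (by omega), PySem.List.pyRange_neg_one_eq_nil (by omega)]
    rw [h1, h2, idxA_eq_idxB]
    simp [headerB, closerB, idxB]
  | succ m ih =>
    intro n k h hm
    rw [freeRecAuxA]
    have hcond : (k ≠ n - 1 ∧ k < n - 1) := by omega
    rw [if_pos hcond, ih n (k + 1) (by omega) (by omega), idxA_eq_idxB]
    have h1 : PySem.List.pyRange k n 1 = k :: PySem.List.pyRange (k + 1) n 1 :=
      PySem.List.pyRange_one_cons (by omega)
    have h2 : PySem.List.pyRange (n - 1) (k - 1) (-1)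
        = PySem.List.pyRange (n - 1) k (-1) ++ [k] :=
      pyRange_countdown_split (n - 1) k (by omega)
    rw [h1, h2]
    simp [headerB, closerB, idxB]

lemma freeRecAuxA_eq (n k : Int) (h : k ≤ n - 1) :
    freeRecAuxA n k
      = (PySem.List.pyRange k n 1).flatMap headerB
        ++ (PySem.List.pyRange (n - 1) (k - 1) (-1)).flatMap closerB :=
  freeRecAuxA_eq_aux (n - 1 - k).toNat n k h rfl

-- ===== VERDICT (by name: the statement is the Claim_ definition above) =====
theorem free_recursive_spec : Claim_equal_free_recursive := by
  intro n k _ hpre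
  unfold Spec_free_recursive free_recursive free_recursive_alt
  rw [freeRecAuxA_eq n k hpre.1]
  simp [List.flatMap]
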